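-- pv_equiv track=rewrite | github.com/mi6oo6im/my_python_training | algorithms_with_python/graph_theory_traversal_and_topological_sorting_training/2_source_removal_topological_sorting.py | find_dependencies
-- ===== SOURCE A (Python) =====
-- def find_dependencies(graph):
--     result = {}
--
--     for node, children in graph.items():
--         if node not in result:
--             result[node] = 0
--
--         for child in children:
--             if child not in result:
--                 result[child] = 1
--             else:
--                 result[child] += 1
--
--     return result
-- ===== SOURCE B (Python) =====
-- def find_dependencies(graph):
--     # Flatten the graph into a single stream of (key, increment) events
--     # (each node contributes 0, each child occurrence contributes 1),
--     # then fold the stream with one uniform update -- no membership branches.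
--     events = []
--     for node, children in graph.items():
--         events.append((node, 0))
--         events.extend((child, 1) for child in children)
--     result = {}
--     for key, inc in events:
--         result[key] = result.get(key, 0) + inc
--     return result
-- ===== Notes on version B (the rewrite author's own statement) =====
-- stated objective: alternative
-- what changed: B first flattens the graph into a single stream of (key, increment) events and then folds it with one uniform branch-free update result[key] = result.get(key, 0) + inc, instead of A's nested loops with separate membership-tested branches for nodes and children.
import Mathlib
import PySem

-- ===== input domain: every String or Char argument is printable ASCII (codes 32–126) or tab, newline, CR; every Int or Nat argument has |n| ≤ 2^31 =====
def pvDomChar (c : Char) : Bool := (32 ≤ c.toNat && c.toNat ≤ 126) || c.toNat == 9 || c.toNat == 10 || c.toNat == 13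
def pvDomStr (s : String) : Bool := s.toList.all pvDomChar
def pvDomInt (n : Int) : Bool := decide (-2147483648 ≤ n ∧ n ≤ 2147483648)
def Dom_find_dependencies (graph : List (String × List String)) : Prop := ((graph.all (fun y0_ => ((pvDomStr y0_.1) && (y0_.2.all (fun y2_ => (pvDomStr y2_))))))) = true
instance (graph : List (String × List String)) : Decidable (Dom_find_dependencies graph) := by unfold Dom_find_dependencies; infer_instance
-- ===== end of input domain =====

-- B replaces A's nested loops (with membership-tested branches) by flattening the graph into a
-- single (key, increment) event stream folded with one uniform update (alternative decomposition).

-- ===== PORT A =====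
def find_dependencies (graph : List (String × List String)) : List (String × Int) :=
  (graph.foldl
    (fun result nc =>
      let result := if result.contains nc.1 then result else result.insert nc.1 0
      nc.2.foldl
        (fun r child =>
          if r.contains child then r.insert child (r.getD child 0 + 1)
          else r.insert child 1)
        result)
    (PySem.Dict.empty : PySem.Dict String Int)).items

-- ===== PORT B =====
def find_dependencies_alt (graph : List (String × List String)) : List (String × Int) :=
  let events : List (String × Int) :=
    graph.foldl (fun acc nc => (acc ++ [(nc.1, 0)]) ++ nc.2.map (fun c => (c, 1))) []
  (events.foldl
    (fun result kv => result.insert kv.1 (result.getD kv.1 0 + kv.2))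
    (PySem.Dict.empty : PySem.Dict String Int)).items

-- ===== PRECONDITION & SPEC =====
def Spec_find_dependencies (graph : List (String × List String)) (out : List (String × Int)) : Prop := out = find_dependencies_alt graph
instance (graph : List (String × List String)) (out : List (String × Int)) : Decidable (Spec_find_dependencies graph out) := by unfold Spec_find_dependencies; infer_instance

-- ===== CLAIM (what is proved, stated in full; the proofs are below) =====
def Claim_equal_find_dependencies : Prop := ∀ (graph : List (String × List String)), Dom_find_dependencies graph → Spec_find_dependencies graph (find_dependencies graph)

-- ===== LEMMAS AND PROOFS =====

-- re-inserting a key's own current value is a no-op (needs unique keys)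
theorem pv_insert_getD_self {κ ν : Type} [DecidableEq κ] (d : PySem.Dict κ ν) (k : κ) (v0 : ν)
    (hnd : d.keys.Nodup) (hc : d.contains k = true) : d.insert k (d.getD k v0) = d := by
  apply PySem.Dict.ext
  rw [PySem.Dict.items_insert_of_contains d (d.getD k v0) hc]
  conv_rhs => rw [← List.map_id d.items]
  apply List.map_congr_left
  intro p hp
  by_cases h : p.1 = k
  · have h2 : (p.1, p.2) ∈ d.items := by simpa using hp
    have h3 := PySem.Dict.getD_of_mem_items d h2 hnd v0
    subst h
    simp [h3]
  · simp [h]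

-- A's branching child step is B's uniform step, on every dict
theorem pv_child_step_eq (r : PySem.Dict String Int) (c : String) :
    (if r.contains c then r.insert c (r.getD c 0 + 1) else r.insert c 1)
      = r.insert c (r.getD c 0 + 1) := by
  by_cases h : r.contains c = true
  · simp [h]
  · have h0 : r.getD c 0 = 0 := PySem.Dict.getD_of_not_contains r 0 (by simpa using h)
    simp [h, h0]

-- B's event list is the flatMap of per-entry event lists
theorem pv_events_eq (graph : List (String × List String)) :
    graph.foldl (fun acc nc => (acc ++ [(nc.1, 0)]) ++ nc.2.map (fun c => (c, 1))) ([] : List (String × Int))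
      = graph.flatMap (fun nc => (nc.1, (0:Int)) :: nc.2.map (fun c => (c, 1))) := by
  have h := PySem.List.foldl_append_eq_flatMap
    (fun nc : String × List String => [(nc.1, (0:Int))] ++ nc.2.map (fun c => (c, 1))) graph []
  simp only [List.append_assoc] at *
  rw [h]
  simp

-- one graph entry processed A's way equals its event list processed B's way
theorem pv_entry_eq (n : String) (cs : List String) (d : PySem.Dict String Int)
    (hnd : d.keys.Nodup) :
    (cs.foldl
      (fun r child =>
        if r.contains child then r.insert child (r.getD child 0 + 1)
        else r.insert child 1)
      (if d.contains n then d else d.insert n 0))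
    = ((n, (0:Int)) :: cs.map (fun c => (c, (1:Int)))).foldl
        (fun result kv => result.insert kv.1 (result.getD kv.1 0 + kv.2)) d := by
  have h1 : (if d.contains n then d else d.insert n 0) = d.insert n (d.getD n 0 + 0) := by
    by_cases h : d.contains n = true
    · rw [if_pos h, add_zero, pv_insert_getD_self d n 0 hnd h]
    · have h0 : d.getD n 0 = 0 := PySem.Dict.getD_of_not_contains d 0 (by simpa using h)
      simp [h, h0]
  have hf : (fun (r : PySem.Dict String Int) (child : String) =>
      if r.contains child then r.insert child (r.getD child 0 + 1) else r.insert child 1)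
      = fun r child => r.insert child (r.getD child 0 + 1) := by
    funext r c; exact pv_child_step_eq r c
  rw [h1, List.foldl_cons, List.foldl_map, hf]

-- the two dict-valued folds agree from any start with unique keys
theorem pv_fold_eq (graph : List (String × List String)) (d : PySem.Dict String Int)
    (hnd : d.keys.Nodup) :
    graph.foldl
      (fun result nc =>
        let result := if result.contains nc.1 then result else result.insert nc.1 0
        nc.2.foldl
          (fun r child =>
            if r.contains child then r.insert child (r.getD child 0 + 1)
            else r.insert child 1)
          result)
      d
    = (graph.flatMap (fun nc => (nc.1, (0:Int)) :: nc.2.map (fun c => (c, 1)))).foldl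
        (fun result kv => result.insert kv.1 (result.getD kv.1 0 + kv.2)) d := by
  induction graph generalizing d with
  | nil => rfl
  | cons nc rest ih =>
    simp only [List.foldl_cons, List.flatMap_cons, List.foldl_append]
    have he := pv_entry_eq nc.1 nc.2 d hnd
    simp only [List.foldl_cons, List.foldl_map] at he
    rw [he]
    simp only [List.foldl_map]
    apply ih
    have hn := PySem.Dict.nodup_keys_foldl_insert_key
      ((nc.1, (0:Int)) :: nc.2.map (fun c => (c, (1:Int)))) Prod.fst
      (fun result kv => result.getD kv.1 0 + kv.2) d hnd
    simp only [List.foldl_cons, List.foldl_map] at hn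
    exact hn

-- ===== VERDICT (by name: the statement is the Claim_ definition above) =====
theorem find_dependencies_spec : Claim_equal_find_dependencies := by
  intro graph _
  unfold Spec_find_dependencies find_dependencies find_dependencies_alt
  rw [pv_events_eq, pv_fold_eq graph PySem.Dict.empty (by simp [PySem.Dict.keys_empty])]
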